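-- pv_equiv track=rewrite | github.com/KamilMarzynski/crm-memory-retrieval-research | src/memory_retrieval/experiments/comparison.py | group_runs_by_fingerprint
-- ===== SOURCE A (Python) =====
-- from typing import Any
--
-- def group_runs_by_fingerprint(
--     summaries: list[dict[str, Any]],
-- ) -> dict[str, list[dict[str, Any]]]:
--     """Group run summaries by their config fingerprint hash.
--
--     Returns dict of {fingerprint_hash: [summaries]}.
--     Runs without a fingerprint are grouped under "unknown".
--     """
--     groups: dict[str, list[dict[str, Any]]] = {}
--     for summary in summaries:
--         fingerprint = summary.get("config_fingerprint", {})
--         hash_key = fingerprint.get("fingerprint_hash", "unknown")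
--         groups.setdefault(hash_key, []).append(summary)
--     return groups
-- ===== SOURCE B (Python) =====
-- def group_runs_by_fingerprint(summaries):
--     """Group run summaries by config fingerprint hash: key-extraction pass,
--     ordered dedup of keys, then one filter pass per distinct key."""
--     keys = [
--         s.get("config_fingerprint", {}).get("fingerprint_hash", "unknown")
--         for s in summaries
--     ]
--     order = list(dict.fromkeys(keys))
--     return {k: [s for s, kk in zip(summaries, keys) if kk == k] for k in order}
-- ===== Notes on version B (the rewrite author's own statement) =====
-- stated objective: alternative
-- what changed: Replaces the one-pass setdefault-append dict accumulation by a key-extraction pass, an ordered dedup of the keys, and one filter pass per distinct key building the result as a dict comprehension.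
import Mathlib
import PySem

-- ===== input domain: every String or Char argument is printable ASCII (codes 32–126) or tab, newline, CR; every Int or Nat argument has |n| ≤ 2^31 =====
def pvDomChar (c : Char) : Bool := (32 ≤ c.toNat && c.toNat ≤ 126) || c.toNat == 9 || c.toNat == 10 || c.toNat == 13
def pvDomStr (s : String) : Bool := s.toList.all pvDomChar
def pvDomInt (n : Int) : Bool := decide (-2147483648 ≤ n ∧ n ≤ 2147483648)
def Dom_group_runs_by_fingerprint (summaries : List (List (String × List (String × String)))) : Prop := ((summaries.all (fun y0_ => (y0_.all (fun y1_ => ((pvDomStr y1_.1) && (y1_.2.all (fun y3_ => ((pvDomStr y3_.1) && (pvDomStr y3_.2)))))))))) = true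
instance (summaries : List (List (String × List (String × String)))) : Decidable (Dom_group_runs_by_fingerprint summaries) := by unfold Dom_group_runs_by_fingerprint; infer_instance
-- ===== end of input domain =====

-- B replaces A's one-pass setdefault dict accumulation by key extraction + ordered dedup + one filter per distinct key (alternative decomposition, same results).


-- ===== PORT A =====
-- summary.get("config_fingerprint", {}).get("fingerprint_hash", "unknown"); setdefault(k, []).append(s) is Dict.modify k [] (· ++ [s])
def group_runs_by_fingerprint (summaries : List (List (String × List (String × String)))) : List (String × List (List (String × List (String × String)))) :=
  (summaries.foldl (fun groups summary =>
      let fingerprint := (PySem.Dict.mk summary).getD "config_fingerprint" []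
      let hash_key := (PySem.Dict.mk fingerprint).getD "fingerprint_hash" "unknown"
      groups.modify hash_key [] (· ++ [summary]))
    PySem.Dict.empty).items

-- ===== PORT B =====
def pvKeyOf (s : List (String × List (String × String))) : String :=
  (PySem.Dict.mk ((PySem.Dict.mk s).getD "config_fingerprint" [])).getD "fingerprint_hash" "unknown"

def group_runs_by_fingerprint_alt (summaries : List (List (String × List (String × String)))) : List (String × List (List (String × List (String × String)))) :=
  let keys := summaries.map pvKeyOf
  let order := PySem.List.dedup keys
  order.map (fun k => (k, ((summaries.zip keys).filter (fun p => p.2 == k)).map (·.1)))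

-- ===== PRECONDITION & SPEC =====
def Spec_group_runs_by_fingerprint (summaries : List (List (String × List (String × String)))) (out : List (String × List (List (String × List (String × String))))) : Prop := out = group_runs_by_fingerprint_alt summaries
instance (summaries : List (List (String × List (String × String)))) (out : List (String × List (List (String × List (String × String))))) : Decidable (Spec_group_runs_by_fingerprint summaries out) := by
  unfold Spec_group_runs_by_fingerprint
  -- built stepwise: default instance synthesis gives up at this nesting depth
  letI h2 : DecidableEq (List (List (String × List (String × String)))) := fun x y => List.hasDecEq x y
  letI hp : DecidableEq (String × List (List (String × List (String × String)))) := @instDecidableEqProd _ _ _ h2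
  exact List.hasDecEq _ _

-- ===== CLAIM (what is proved, stated in full; the proofs are below) =====
def Claim_equal_group_runs_by_fingerprint : Prop := ∀ (summaries : List (List (String × List (String × String)))), Dom_group_runs_by_fingerprint summaries → Spec_group_runs_by_fingerprint summaries (group_runs_by_fingerprint summaries)

-- ===== LEMMAS AND PROOFS =====

theorem pv_zip_map_self {α β : Type} (f : α → β) (l : List α) :
    l.zip (l.map f) = l.map (fun x => (x, f x)) := by
  induction l with
  | nil => rfl
  | cons h t ih =>
    simp only [List.zip] at ih
    simp [List.zip, ih]

-- A's fold with the key computed inline is the fold over (key, summary) pairs.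
theorem pv_foldA_eq_pairs (summaries : List (List (String × List (String × String)))) :
    summaries.foldl (fun groups summary =>
        let fingerprint := (PySem.Dict.mk summary).getD "config_fingerprint" []
        let hash_key := (PySem.Dict.mk fingerprint).getD "fingerprint_hash" "unknown"
        groups.modify hash_key [] (· ++ [summary])) PySem.Dict.empty
    = (summaries.map (fun s => (pvKeyOf s, s))).foldl
        (fun groups p => groups.modify p.1 [] (· ++ [p.2])) PySem.Dict.empty := by
  rw [List.foldl_map]
  rfl

-- ===== VERDICT (by name: the statement is the Claim_ definition above) =====
theorem group_runs_by_fingerprint_spec : Claim_equal_group_runs_by_fingerprint := by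
  intro summaries _
  show _ = _
  unfold group_runs_by_fingerprint group_runs_by_fingerprint_alt
  rw [pv_foldA_eq_pairs]
  set d := (summaries.map (fun s => (pvKeyOf s, s))).foldl
      (fun groups p => groups.modify p.1 [] (· ++ [p.2])) PySem.Dict.empty with hd
  have hnd : d.keys.Nodup := by
    rw [hd]
    exact PySem.Dict.nodup_keys_foldl_modify_key _ _ _ _ _ (by simp [PySem.Dict.keys_empty])
  have hkeys : d.keys = PySem.List.dedup (summaries.map pvKeyOf) := by
    rw [hd, PySem.Dict.keys_foldl_modify_key]
    simp [PySem.Dict.keys_empty, PySem.List.dedup_eq_ofList, PySem.Set.ofList_eq_foldl,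
      PySem.Set.update, List.map_map, Function.comp_def]
  rw [PySem.Dict.items_eq_map_keys d hnd [], hkeys]
  apply List.map_congr_left
  intro k _
  have hget : d.getD k [] = ((summaries.map (fun s => (pvKeyOf s, s))).filter
      (fun p => p.1 == k)).map (·.2) := by
    rw [hd, PySem.Dict.getD_foldl_modify_append]
    simp [PySem.Dict.getD_empty]
  rw [hget]
  rw [pv_zip_map_self pvKeyOf summaries]
  simp [List.filter_map, List.map_map, Function.comp_def]
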